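-- pv_equiv track=rewrite | github.com/Radium-bit/BlindWatermarkGUI | watermark/spiral_interleaver.py | generate_clockwise_spiral_path
-- ===== SOURCE A (Python) =====
-- from typing import Union, Tuple, Optional, List
--
-- SPIRAL_CACHE = {}  # 路径缓存，提高性能
--
-- def generate_clockwise_spiral_path(width: int, height: int) -> List[Tuple[int, int]]:
--     """
--     生成顺时针从外向内的螺旋路径
--
--     这是最常用和稳定的螺旋模式
--
--     Args:
--         width: 矩阵宽度
--         height: 矩阵高度
--
--     Returns:
--         坐标列表 [(row, col), ...]
--     """
--     # 检查缓存
--     cache_key = (width, height, 'clockwise_in')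
--     if cache_key in SPIRAL_CACHE:
--         return SPIRAL_CACHE[cache_key]
--
--     path = []
--     top, bottom = 0, height - 1
--     left, right = 0, width - 1
--
--     while top <= bottom and left <= right:
--         # 上边：左到右
--         for col in range(left, min(right + 1, width)):
--             if top < height:
--                 path.append((top, col))
--         top += 1
--
--         # 右边：上到下
--         for row in range(top, min(bottom + 1, height)):
--             if right < width:
--                 path.append((row, right))
--         right -= 1
--
--         # 下边：右到左
--         if top <= bottom:
--             for col in range(right, left - 1, -1):
--                 if bottom < height and col >= 0:
--                     path.append((bottom, col))
--             bottom -= 1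
--
--         # 左边：下到上
--         if left <= right:
--             for row in range(bottom, top - 1, -1):
--                 if left < width and row >= 0:
--                     path.append((row, left))
--             left += 1
--
--     # 缓存结果
--     SPIRAL_CACHE[cache_key] = path
--     return path
-- ===== SOURCE B (Python) =====
-- from typing import List, Tuple
--
-- SPIRAL_CACHE = {}  # 路径缓存，提高性能
--
--
-- def generate_clockwise_spiral_path(width: int, height: int) -> List[Tuple[int, int]]:
--     """Clockwise inward spiral by repeated "take top row, rotate the rest"
--     with an explicit affine transform, instead of four-edge layer peeling."""
--     cache_key = (width, height, 'clockwise_in')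
--     if cache_key in SPIRAL_CACHE:
--         return SPIRAL_CACHE[cache_key]
--
--     path = []
--     cw, ch = width, height
--     # affine map local -> absolute: (r, c) |-> (p + a*r + b*c, q + g*r + d*c)
--     p, q, a, b, g, d = 0, 0, 1, 0, 0, 1
--     while cw > 0 and ch > 0:
--         # emit the current grid's top row (local row 0); (b, d) is a signed unit
--         # vector, so one coordinate is constant along the row — share its object
--         if b == 0:
--             path.extend((p, q + d * c) for c in range(cw))
--         elif d == 0:
--             path.extend((p + b * c, q) for c in range(cw))
--         else:
--             path.extend((p + b * c, q + d * c) for c in range(cw))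
--         # the rest is a (ch-1) x cw grid; rotate it counter-clockwise so that
--         # its right column (walked downward) becomes the next top row:
--         # new local (r, c) corresponds to old local (1 + c, cw - 1 - r)
--         p, q = p + a + b * (cw - 1), q + g + d * (cw - 1)
--         a, b, g, d = -b, a, -d, g
--         cw, ch = ch - 1, cw
--
--     SPIRAL_CACHE[cache_key] = path
--     return path
-- ===== Notes on version B (the rewrite author's own statement) =====
-- stated objective: alternative
-- what changed: Replaces the four-edge layer-peeling loop (top/bottom/left/right boundaries with per-edge guards) by a 'take the top row, then rotate the rest counter-clockwise' iteration that maintains a single affine transform from local to absolute coordinates.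
import Mathlib
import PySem

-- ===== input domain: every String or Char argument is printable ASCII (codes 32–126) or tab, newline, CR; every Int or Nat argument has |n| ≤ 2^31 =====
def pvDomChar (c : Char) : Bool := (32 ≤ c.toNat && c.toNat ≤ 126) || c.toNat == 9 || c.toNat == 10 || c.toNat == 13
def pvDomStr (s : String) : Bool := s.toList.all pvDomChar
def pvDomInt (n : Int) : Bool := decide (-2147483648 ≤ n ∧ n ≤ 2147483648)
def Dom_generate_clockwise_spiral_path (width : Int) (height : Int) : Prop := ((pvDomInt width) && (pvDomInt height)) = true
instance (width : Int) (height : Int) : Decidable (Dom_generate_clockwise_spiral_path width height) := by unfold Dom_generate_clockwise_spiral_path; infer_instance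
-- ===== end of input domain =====

-- B replaces A's four-edge layer peeling by "emit top row, rotate the rest" with one affine
-- transform; same O(width*height) cost. The SPIRAL_CACHE is a value-transparent memo in both
-- Pythons (it never changes the returned list's value), so the ports model the pure function.

-- ===== PORT A =====
-- literal port of A's while-loop over the four boundaries (cache elided: value-transparent)
def spiralLoopA : Nat → Int → Int → Int → Int → Int → Int → List (Int × Int)
  | 0, _, _, _, _, _, _ => []
  | fuel + 1, w, h, top, bottom, left, right =>
    if top ≤ bottom ∧ left ≤ right then
      -- top edge: left→right (guard `top < height`)
      ((PySem.List.pyRange left (min (right + 1) w) 1).filterMap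
          fun col => if top < h then some (top, col) else none)
      -- right edge: top→bottom after `top += 1` (guard `right < width`)
      ++ ((PySem.List.pyRange (top + 1) (min (bottom + 1) h) 1).filterMap
          fun row => if right < w then some (row, right) else none)
      -- bottom edge (only if `top <= bottom` after the increment), right→left after `right -= 1`
      ++ (if top + 1 ≤ bottom then
          (PySem.List.pyRange (right - 1) (left - 1) (-1)).filterMap
            fun col => if bottom < h ∧ 0 ≤ col then some (bottom, col) else none
        else [])
      -- left edge (only if `left <= right` after the decrement), bottom→top
      ++ (if left ≤ right - 1 then
          (PySem.List.pyRange (if top + 1 ≤ bottom then bottom - 1 else bottom) (top + 1 - 1) (-1)).filterMap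
            fun row => if left < w ∧ 0 ≤ row then some (row, left) else none
        else [])
      ++ spiralLoopA fuel w h (top + 1) (if top + 1 ≤ bottom then bottom - 1 else bottom)
          (if left ≤ right - 1 then left + 1 else left) (right - 1)
    else []

def generate_clockwise_spiral_path (width : Int) (height : Int) : List (Int × Int) :=
  spiralLoopA (width + height).toNat width height 0 (height - 1) 0 (width - 1)

-- ===== PORT B =====
-- literal port of B's while-loop: emit the current top row through the affine transform
-- (r,c) ↦ (p + a r + b c, q + g r + d c), then compose with the counter-clockwise rotation
def spiralLoopB : Nat → Int → Int → Int → Int → Int → Int → Int → Int → List (Int × Int)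
  | 0, _, _, _, _, _, _, _, _ => []
  | fuel + 1, cw, ch, p, q, a, b, g, d =>
    if 0 < cw ∧ 0 < ch then
      -- the emitted row, with the constant coordinate branch-shared as in Source B
      (if b = 0 then (PySem.List.pyRange 0 cw 1).map (fun c => (p, q + d * c))
       else if d = 0 then (PySem.List.pyRange 0 cw 1).map (fun c => (p + b * c, q))
       else (PySem.List.pyRange 0 cw 1).map (fun c => (p + b * c, q + d * c))) ++
        spiralLoopB fuel (ch - 1) cw (p + a + b * (cw - 1)) (q + g + d * (cw - 1)) (-b) a (-d) g
    else []

def generate_clockwise_spiral_path_alt (width : Int) (height : Int) : List (Int × Int) :=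
  spiralLoopB (width + height).toNat width height 0 0 1 0 0 1

-- ===== PRECONDITION & SPEC =====
def Spec_generate_clockwise_spiral_path (width : Int) (height : Int) (out : List (Int × Int)) : Prop := out = generate_clockwise_spiral_path_alt width height
instance (width : Int) (height : Int) (out : List (Int × Int)) : Decidable (Spec_generate_clockwise_spiral_path width height out) := by unfold Spec_generate_clockwise_spiral_path; infer_instance

-- ===== CLAIM (what is proved, stated in full; the proofs are below) =====
def Claim_equal_generate_clockwise_spiral_path : Prop := ∀ (width : Int) (height : Int), Dom_generate_clockwise_spiral_path width height → Spec_generate_clockwise_spiral_path width height (generate_clockwise_spiral_path width height)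

-- ===== LEMMAS AND PROOFS =====

-- proof-only reference spiral: top row, then the rest rotated counter-clockwise
def spiralS (w h : Int) : List (Int × Int) :=
  if 0 < w ∧ 0 < h then
    (PySem.List.pyRange 0 w 1).map (fun c => ((0 : Int), c)) ++
      (spiralS (h - 1) w).map (fun rc => (1 + rc.2, w - 1 - rc.1))
  else []
termination_by (w + h).toNat
decreasing_by omega

theorem spiralS_step (w h : Int) (hw : 0 < w) (hh : 0 < h) :
    spiralS w h = (PySem.List.pyRange 0 w 1).map (fun c => ((0 : Int), c)) ++
      (spiralS (h - 1) w).map (fun rc => (1 + rc.2, w - 1 - rc.1)) := by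
  rw [spiralS, if_pos ⟨hw, hh⟩]

theorem spiralS_nil (w h : Int) (hwh : w ≤ 0 ∨ h ≤ 0) : spiralS w h = [] := by
  rw [spiralS, if_neg (by omega)]

theorem loopB_eq : ∀ (N : Nat) (cw ch p q a b g d : Int), (cw + ch).toNat ≤ N →
    spiralLoopB N cw ch p q a b g d =
      (spiralS cw ch).map (fun rc => (p + a * rc.1 + b * rc.2, q + g * rc.1 + d * rc.2)) := by
  intro N
  induction N with
  | zero =>
    intro cw ch p q a b g d hm
    rw [spiralS_nil cw ch (by omega)]
    simp [spiralLoopB]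
  | succ N ih =>
    intro cw ch p q a b g d hm
    by_cases hc : 0 < cw ∧ 0 < ch
    · have hrow : (if b = 0 then (PySem.List.pyRange 0 cw 1).map (fun c => (p, q + d * c))
          else if d = 0 then (PySem.List.pyRange 0 cw 1).map (fun c => (p + b * c, q))
          else (PySem.List.pyRange 0 cw 1).map (fun c => (p + b * c, q + d * c))) =
          (PySem.List.pyRange 0 cw 1).map (fun c => (p + b * c, q + d * c)) := by
        split_ifs with h1 h2
        · exact List.map_congr_left fun c _ => by simp [h1]
        · exact List.map_congr_left fun c _ => by simp [h2]
        · rfl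
      rw [spiralLoopB, if_pos hc, hrow, spiralS_step cw ch hc.1 hc.2, List.map_append, List.map_map,
        ih (ch - 1) cw _ _ _ _ _ _ (by omega), List.map_map]
      congr 1
      · refine List.map_congr_left fun x _ => ?_
        simp
      · refine List.map_congr_left fun rc _ => ?_
        simp [Function.comp]; constructor <;> ring
    · rw [spiralLoopB, if_neg hc, spiralS_nil cw ch (by omega)]
      simp

theorem loopA_nil (fuel : Nat) (w h t b l r : Int) (hc : ¬(t ≤ b ∧ l ≤ r)) :
    spiralLoopA fuel w h t b l r = [] := by
  cases fuel with
  | zero => rfl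
  | succ fuel => rw [spiralLoopA, if_neg hc]

theorem filterMap_if_all {P : Int → Prop} [DecidablePred P] (xs : List Int) (f : Int → Int × Int)
    (h : ∀ x ∈ xs, P x) :
    xs.filterMap (fun c => if P c then some (f c) else none) = xs.map f := by
  rw [List.filterMap_congr (g := fun c => some (f c)) ?_]
  · simp
  · intro x hx; simp [h x hx]

theorem range_map_eq (N1 N2 : Nat) (f g : Nat → Int × Int) (hN : N1 = N2)
    (h : ∀ k, k < N1 → f k = g k) :
    (List.range N1).map f = (List.range N2).map g := by
  subst hN
  exact List.map_congr_left fun k hk => h k (List.mem_range.mp hk)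

theorem loopA_eq : ∀ (N : Nat) (w h t b l r : Int),
    ((b - t) + (r - l) + 2).toNat ≤ N → 0 ≤ t → 0 ≤ l → b < h → r < w →
    spiralLoopA N w h t b l r =
      (spiralS (r - l + 1) (b - t + 1)).map (fun rc => (t + rc.1, l + rc.2)) := by
  intro N
  induction N with
  | zero =>
    intro w h t b l r hm ht hl hbh hrw
    rw [loopA_nil _ _ _ _ _ _ _ (by omega), spiralS_nil _ _ (by omega)]
    rfl
  | succ N ih =>
    intro w h t b l r hm ht hl hbh hrw
    by_cases hc : t ≤ b ∧ l ≤ r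
    · rw [spiralLoopA, if_pos hc,
        min_eq_left (by omega : r + 1 ≤ w), min_eq_left (by omega : b + 1 ≤ h),
        filterMap_if_all _ _ (fun x _ => (by omega : t < h)),
        filterMap_if_all _ _ (fun x _ => (by omega : r < w))]
      by_cases hb : t + 1 ≤ b
      · by_cases hr : l ≤ r - 1
        · -- general case: both dimensions ≥ 2
          simp only [if_pos hb, if_pos hr]
          rw [filterMap_if_all _ _ (fun x hx => by
                have := PySem.List.mem_pyRange_neg_one.mp hx; omega),
              filterMap_if_all _ _ (fun x hx => by
                have := PySem.List.mem_pyRange_neg_one.mp hx; omega),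
              ih w h (t + 1) (b - 1) (l + 1) (r - 1) (by omega) (by omega) (by omega)
                (by omega) (by omega),
              spiralS_step (r - l + 1) (b - t + 1) (by omega) (by omega),
              spiralS_step (b - t + 1 - 1) (r - l + 1) (by omega) (by omega),
              spiralS_step (r - l + 1 - 1) (b - t + 1 - 1) (by omega) (by omega),
              show (r - 1 - (l + 1) + 1 : Int) = r - l + 1 - 1 - 1 from by ring,
              show (b - 1 - (t + 1) + 1 : Int) = b - t + 1 - 1 - 1 from by ring]
          by_cases hbb : t + 2 ≤ b
          · rw [spiralS_step (b - t + 1 - 1 - 1) (r - l + 1 - 1) (by omega) (by omega)]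
            simp only [List.map_append, List.map_map, List.append_assoc]
            congr 1
            · rw [PySem.List.pyRange_one, PySem.List.pyRange_one, List.map_map, List.map_map]
              apply range_map_eq
              · omega
              · intro k hk
                simp only [Function.comp_def, Prod.mk.injEq]
                omega
            congr 1
            · rw [PySem.List.pyRange_one, PySem.List.pyRange_one, List.map_map, List.map_map]
              apply range_map_eq
              · omega
              · intro k hk
                simp only [Function.comp_def, Prod.mk.injEq]
                omega
            congr 1
            · rw [PySem.List.pyRange_neg_one, PySem.List.pyRange_one, List.map_map, List.map_map]
              apply range_map_eq
              · omega
              · intro k hk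
                simp only [Function.comp_def, Prod.mk.injEq]
                omega
            congr 1
            · rw [PySem.List.pyRange_neg_one, PySem.List.pyRange_one, List.map_map, List.map_map]
              apply range_map_eq
              · omega
              · intro k hk
                simp only [Function.comp_def, Prod.mk.injEq]
                omega
            refine List.map_congr_left fun rc _ => ?_
            simp only [Function.comp_def, Prod.mk.injEq]
            omega
          · rw [spiralS_nil (b - t + 1 - 1 - 1) (r - l + 1 - 1) (by omega),
                spiralS_nil (r - l + 1 - 1 - 1) (b - t + 1 - 1 - 1) (by omega),
                PySem.List.pyRange_neg_one_eq_nil (by omega : b - 1 ≤ t + 1 - 1)]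
            simp only [List.map_nil, List.append_nil, List.map_append, List.map_map,
              List.append_assoc]
            congr 1
            · rw [PySem.List.pyRange_one, PySem.List.pyRange_one, List.map_map, List.map_map]
              apply range_map_eq
              · omega
              · intro k hk
                simp only [Function.comp_def, Prod.mk.injEq]
                omega
            congr 1
            · rw [PySem.List.pyRange_one, PySem.List.pyRange_one, List.map_map, List.map_map]
              apply range_map_eq
              · omega
              · intro k hk
                simp only [Function.comp_def, Prod.mk.injEq]
                omega
            rw [PySem.List.pyRange_neg_one, PySem.List.pyRange_one, List.map_map, List.map_map]
            apply range_map_eq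
            · omega
            · intro k hk
              simp only [Function.comp_def, Prod.mk.injEq]
              omega
        · -- single column: r = l
          simp only [if_pos hb, if_neg hr]
          rw [PySem.List.pyRange_neg_one_eq_nil (by omega : r - 1 ≤ l - 1),
              loopA_nil _ _ _ _ _ _ _ (by omega),
              spiralS_step (r - l + 1) (b - t + 1) (by omega) (by omega),
              spiralS_step (b - t + 1 - 1) (r - l + 1) (by omega) (by omega),
              spiralS_nil (r - l + 1 - 1) (b - t + 1 - 1) (by omega)]
          simp only [List.filterMap_nil, List.map_nil, List.append_nil, List.map_append,
            List.map_map]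
          congr 1
          · rw [PySem.List.pyRange_one, PySem.List.pyRange_one, List.map_map, List.map_map]
            apply range_map_eq
            · omega
            · intro k hk
              simp only [Function.comp_def, Prod.mk.injEq]
              omega
          · rw [PySem.List.pyRange_one, PySem.List.pyRange_one, List.map_map, List.map_map]
            apply range_map_eq
            · omega
            · intro k hk
              simp only [Function.comp_def, Prod.mk.injEq]
              omega
      · -- single row: b = t
        simp only [if_neg hb]
        rw [PySem.List.pyRange_one_eq_nil (by omega : b + 1 ≤ t + 1),
            loopA_nil _ _ _ _ _ _ _ (by omega)]
        have h4 : (if l ≤ r - 1 then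
            (PySem.List.pyRange b (t + 1 - 1) (-1)).filterMap
              fun row => if l < w ∧ 0 ≤ row then some (row, l) else none
          else []) = [] := by
          split_ifs with h1
          · rw [PySem.List.pyRange_neg_one_eq_nil (by omega)]; rfl
          · rfl
        rw [h4, spiralS_step _ _ (by omega) (by omega), spiralS_nil _ _ (by omega)]
        simp only [List.map_nil, List.append_nil, List.map_map]
        rw [PySem.List.pyRange_one, PySem.List.pyRange_one, List.map_map, List.map_map,
          show (r + 1 - l).toNat = (r - l + 1 - 0).toNat from by omega]
        refine List.map_congr_left fun k hk => ?_
        simp only [Function.comp_def, Prod.mk.injEq]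
        constructor <;> omega
    · rw [loopA_nil _ _ _ _ _ _ _ hc, spiralS_nil _ _ (by omega)]
      rfl

-- ===== VERDICT (by name: the statement is the Claim_ definition above) =====
theorem generate_clockwise_spiral_path_spec : Claim_equal_generate_clockwise_spiral_path := by
  intro w h _
  unfold Spec_generate_clockwise_spiral_path generate_clockwise_spiral_path
    generate_clockwise_spiral_path_alt
  rw [loopA_eq (w + h).toNat w h 0 (h - 1) 0 (w - 1) (by omega) le_rfl le_rfl (by omega) (by omega),
      loopB_eq (w + h).toNat w h 0 0 1 0 0 1 le_rfl,
      show (w - 1 - 0 + 1 : Int) = w from by ring,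
      show (h - 1 - 0 + 1 : Int) = h from by ring]
  simp
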